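-- pv_equiv track=rewrite | github.com/Xuyuanp/leetcode-2021 | 1278.palindrome-partitioning-iii.py | palindromePartition1
-- ===== SOURCE A (Python) =====
-- from functools import cache
--
-- def palindromePartition1(s: str, k: int) -> int:
--     n = len(s)
--
--     @cache
--     def make_palindrome(start: int, end: int) -> int:
--         if start >= end:
--             return 0
--         return make_palindrome(start + 1, end - 1) + (
--             0 if s[start] == s[end] else 1
--         )
--
--     @cache
--     def helper(end: int, kk: int) -> int:
--         if kk == 1:
--             return make_palindrome(0, end - 1)
--
--         res = float("inf")
--
--         for i in range(end, kk - 1, -1):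
--             curr = make_palindrome(i - 1, end - 1)
--             res = min(res, curr + helper(i - 1, kk - 1))
--
--         return res
--
--     return helper(n, k)
-- ===== SOURCE B (Python) =====
-- def palindromePartition1(s: str, k: int) -> int:
--     n = len(s)
--     if k < 1 or (n < k and k != 1):
--         raise ValueError("cannot split s into k non-empty palindromes")
--     # cost[(i, j)] = changes needed to make s[i:j] a palindrome (missing key -> 0)
--     cost = {}
--     for length in range(2, n + 1):
--         for i in range(n - length + 1):
--             j = i + length
--             cost[(i, j)] = cost.get((i + 1, j - 1), 0) + (1 if s[i] != s[j - 1] else 0)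
--     prev = [cost.get((0, j), 0) for j in range(n + 1)]
--     for m in range(2, k + 1):
--         prev = [min((prev[p] + cost.get((p, j), 0) for p in range(m - 1, j)), default=0)
--                 for j in range(n + 1)]
--     return prev[n]
-- ===== Notes on version B (the rewrite author's own statement) =====
-- stated objective: alternative
-- what changed: Replaced the memoized top-down recursion (cached make_palindrome/helper closures) by an iterative bottom-up DP: a cost table filled by increasing substring length, then dp rows built per piece count with a running min; no recursion or cache.
-- outside the precondition, e.g. on palindromePartition1('ab', 3): A returns inf, B raises ValueError; on palindromePartition1('abc', 0): A raises RecursionError, B raises ValueError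
import Mathlib
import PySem

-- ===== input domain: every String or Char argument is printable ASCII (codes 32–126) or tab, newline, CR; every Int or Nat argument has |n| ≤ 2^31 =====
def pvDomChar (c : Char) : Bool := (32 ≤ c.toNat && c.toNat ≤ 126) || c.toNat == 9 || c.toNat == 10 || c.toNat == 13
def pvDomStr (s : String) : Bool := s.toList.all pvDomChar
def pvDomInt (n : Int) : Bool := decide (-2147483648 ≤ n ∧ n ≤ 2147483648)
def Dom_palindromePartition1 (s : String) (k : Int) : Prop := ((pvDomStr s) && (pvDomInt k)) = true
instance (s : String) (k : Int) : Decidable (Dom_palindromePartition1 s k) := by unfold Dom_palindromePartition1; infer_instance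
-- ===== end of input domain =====

-- B replaces A's memoized top-down recursion by an iterative bottom-up DP (a cost
-- table filled by increasing substring length, then dp rows built per piece count);
-- objective: alternative structure, no recursion/cache. Equivalence is claimed for
-- the return value on Pre_ (1 ≤ k and (k ≤ len(s) or k = 1)); outside it A raises
-- (RecursionError) or returns float('inf'), not an int.

-- ===== PORT A =====
-- make_palindrome(start, end): count of mismatched outer pairs, shrinking inwards.
def pvMP (cs : List Char) (start fin : Int) : Int :=
  if start ≥ fin then 0
  else
    pvMP cs (start + 1) (fin - 1) +
      (if PySem.List.pyGet? cs start == PySem.List.pyGet? cs fin then 0 else 1)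
termination_by (fin - start).toNat
decreasing_by omega

-- helper(end, kk), with fuel for totality (depth is kk; fuel never runs out on Pre_);
-- the running minimum 'res' starts at float('inf'), modelled as 'none'; 'none' from a
-- recursive call stands for an inf result and is absorbed by min exactly as in Python.
def pvHelper (cs : List Char) : Nat → Int → Int → Option Int
  | 0, _, _ => none
  | fuel + 1, e, kk =>
    if kk == 1 then some (pvMP cs 0 (e - 1))
    else
      (PySem.List.pyRange e (kk - 1) (-1)).foldl
        (fun res i =>
          let curr := pvMP cs (i - 1) (e - 1)
          match pvHelper cs fuel (i - 1) (kk - 1) with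
          | none => res
          | some h =>
            match res with
            | none => some (curr + h)
            | some r => some (min r (curr + h)))
        none

def palindromePartition1 (s : String) (k : Int) : Int :=
  (pvHelper s.toList (k.toNat + 1) (PySem.Str.len s) k).getD 0

-- ===== PORT B =====
-- cost[(i, j)] = changes to make s[i:j] a palindrome, filled by increasing length.
def pvCostTab (cs : List Char) : PySem.Dict (Int × Int) Int :=
  (PySem.List.pyRange 2 ((cs.length : Int) + 1) 1).foldl
    (fun d len =>
      (PySem.List.pyRange 0 ((cs.length : Int) - len + 1) 1).foldl
        (fun d i =>
          let j := i + len
          d.insert (i, j)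
            (d.getD (i + 1, j - 1) 0 +
              (if PySem.List.pyGet? cs i ≠ PySem.List.pyGet? cs (j - 1) then 1 else 0)))
        d)
    PySem.Dict.empty

-- min((prev[p] + cost.get((p, j), 0) for p in range(m - 1, j)), default=0)
def pvMinRow (cost : PySem.Dict (Int × Int) Int) (prev : List Int) (m j : Int) : Int :=
  ((PySem.List.pyRange (m - 1) j 1).foldl
      (fun acc p =>
        let v := PySem.List.pyGetD prev p 0 + cost.getD (p, j) 0
        some (match acc with | none => v | some a => min a v))
      none).getD 0

def palindromePartition1_alt (s : String) (k : Int) : Int :=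
  -- Python B raises ValueError here (outside Pre_); the port returns 0 there
  if k < 1 ∨ ((s.toList.length : Int) < k ∧ k ≠ 1) then 0
  else
  let cs := s.toList
  let n : Int := (cs.length : Int)
  let cost := pvCostTab cs
  let row1 := (PySem.List.pyRange 0 (n + 1) 1).map (fun j => cost.getD (0, j) 0)
  let fin := (PySem.List.pyRange 2 (k + 1) 1).foldl
    (fun prev m => (PySem.List.pyRange 0 (n + 1) 1).map (fun j => pvMinRow cost prev m j)) row1
  PySem.List.pyGetD fin n 0

-- ===== PRECONDITION & SPEC =====
-- Pre_ excludes k ≤ 0 (A hits a RecursionError) and k > len(s) with k ≥ 2 (A's min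
-- starts at float('inf') over an empty loop, so A returns the float inf, not an int).
def Pre_palindromePartition1 (s : String) (k : Int) : Prop :=
  1 ≤ k ∧ (k ≤ (s.toList.length : Int) ∨ k = 1)
instance (s : String) (k : Int) : Decidable (Pre_palindromePartition1 s k) := by
  unfold Pre_palindromePartition1; infer_instance

def pvWitness_palindromePartition1 : String × Int := ("abcab", 2)

def Spec_palindromePartition1 (s : String) (k : Int) (out : Int) : Prop :=
  out = palindromePartition1_alt s k
instance (s : String) (k : Int) (out : Int) : Decidable (Spec_palindromePartition1 s k out) := by
  unfold Spec_palindromePartition1; infer_instance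

-- ===== CLAIM (what is proved, stated in full; the proofs are below) =====
def Claim_equal_palindromePartition1 : Prop :=
  ∀ (s : String) (k : Int), Dom_palindromePartition1 s k →
    Pre_palindromePartition1 s k →
    Spec_palindromePartition1 s k (palindromePartition1 s k)

-- ===== LEMMAS AND PROOFS =====

-- The common mathematical value: dpVal m j = min changes to split s[:j] into m palindromes
-- (written exactly as B's row entry, with the cost table replaced by pvMP).
def dpVal (cs : List Char) (m j : Int) : Int :=
  if h : m ≤ 1 then pvMP cs 0 (j - 1)
  else
    ((PySem.List.pyRange (m - 1) j 1).foldl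
        (fun acc p =>
          let v := dpVal cs (m - 1) p + pvMP cs p (j - 1)
          some (match acc with | none => v | some a => min a v))
        none).getD 0
termination_by m.toNat
decreasing_by omega

-- cost-table invariants
def CostSound (cs : List Char) (d : PySem.Dict (Int × Int) Int) : Prop :=
  ∀ i j v : Int, d.get? (i, j) = some v → v = pvMP cs i (j - 1)

def CostComplete (cs : List Char) (d : PySem.Dict (Int × Int) Int) (L : Int) : Prop :=
  ∀ i j : Int, 0 ≤ i → j ≤ (cs.length : Int) → 2 ≤ j - i → j - i ≤ L →
    ∃ v, d.get? (i, j) = some v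

theorem costOK (cs : List Char) (d : PySem.Dict (Int × Int) Int) (L : Int)
    (hs : CostSound cs d) (hc : CostComplete cs d L)
    (i j : Int) (hi : 0 ≤ i) (hj : j ≤ (cs.length : Int)) (hL : j - i ≤ L) :
    d.getD (i, j) 0 = pvMP cs i (j - 1) := by
  cases hg : d.get? (i, j) with
  | some v =>
    rw [PySem.Dict.getD_eq_get?_getD, hg]
    exact hs i j v hg
  | none =>
    have hle : j - i ≤ 1 := by
      by_contra hgt
      obtain ⟨v, hv⟩ := hc i j hi hj (by omega) (by omega)
      simp [hv] at hg
    rw [PySem.Dict.getD_eq_get?_getD, hg, pvMP, if_pos (by omega)]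
    rfl

-- one insertion of the length-len inner loop keeps the dict sound and complete
theorem costInsert_spec (cs : List Char) (len : Int) (h2 : 2 ≤ len)
    (d : PySem.Dict (Int × Int) Int) (hs : CostSound cs d)
    (hc : CostComplete cs d (len - 1)) (i : Int) (hi : 0 ≤ i)
    (hin : i + len ≤ (cs.length : Int)) :
    d.getD (i + 1, i + len - 1) 0 +
        (if PySem.List.pyGet? cs i ≠ PySem.List.pyGet? cs (i + len - 1) then 1 else 0) =
      pvMP cs i (i + len - 1) := by
  have hprev : d.getD (i + 1, i + len - 1) 0 = pvMP cs (i + 1) (i + len - 1 - 1) :=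
    costOK cs d (len - 1) hs hc (i + 1) (i + len - 1) (by omega) (by omega) (by omega)
  rw [hprev]
  have hlt : ¬ (i ≥ i + len - 1) := by omega
  conv_rhs => rw [pvMP, if_neg hlt]
  by_cases h : PySem.List.pyGet? cs i = PySem.List.pyGet? cs (i + len - 1) <;> simp [h]

theorem innerLoop_spec (cs : List Char) (len : Int) (h2 : 2 ≤ len) :
    ∀ (c : Nat) (a : Int) (d : PySem.Dict (Int × Int) Int),
      0 ≤ a →
      (((cs.length : Int) - len + 1) - a).toNat = c →
      CostSound cs d → CostComplete cs d (len - 1) →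
      (∀ i : Int, 0 ≤ i → i < a → ∃ v, d.get? (i, i + len) = some v) →
      CostSound cs
          ((PySem.List.pyRange a ((cs.length : Int) - len + 1) 1).foldl
            (fun d i =>
              let j := i + len
              d.insert (i, j)
                (d.getD (i + 1, j - 1) 0 +
                  (if PySem.List.pyGet? cs i ≠ PySem.List.pyGet? cs (j - 1) then 1 else 0)))
            d) ∧
        CostComplete cs
          ((PySem.List.pyRange a ((cs.length : Int) - len + 1) 1).foldl
            (fun d i =>
              let j := i + len
              d.insert (i, j)
                (d.getD (i + 1, j - 1) 0 +
                  (if PySem.List.pyGet? cs i ≠ PySem.List.pyGet? cs (j - 1) then 1 else 0)))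
            d) (len - 1) ∧
        ∀ i : Int, 0 ≤ i → i < (cs.length : Int) - len + 1 →
          ∃ v, ((PySem.List.pyRange a ((cs.length : Int) - len + 1) 1).foldl
            (fun d i =>
              let j := i + len
              d.insert (i, j)
                (d.getD (i + 1, j - 1) 0 +
                  (if PySem.List.pyGet? cs i ≠ PySem.List.pyGet? cs (j - 1) then 1 else 0)))
            d).get? (i, i + len) = some v := by
  intro c
  induction c with
  | zero =>
    intro a d ha hm hs hc hdone
    rw [PySem.List.pyRange_one_eq_nil (by omega)]
    exact ⟨hs, hc, fun i hi hia => hdone i hi (by omega)⟩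
  | succ c ih =>
    intro a d ha hm hs hc hdone
    rw [PySem.List.pyRange_one_cons (by omega), List.foldl_cons]
    have hval := costInsert_spec cs len h2 d hs hc a ha (by omega)
    refine ih (a + 1)
      (d.insert (a, a + len)
        (d.getD (a + 1, a + len - 1) 0 +
          (if PySem.List.pyGet? cs a ≠ PySem.List.pyGet? cs (a + len - 1) then 1 else 0)))
      (by omega) (by omega) ?_ ?_ ?_
    · intro i j v hget
      rw [PySem.Dict.get?_insert] at hget
      split at hget
      · rename_i he
        injection he with h1 h2
        subst h1; subst h2
        injection hget with h3
        rw [← h3]; exact hval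
      · exact hs i j v hget
    · intro i j hi hj hg1 hg2
      obtain ⟨v, hv⟩ := hc i j hi hj hg1 hg2
      by_cases he : (i, j) = (a, a + len)
      · exact ⟨_, by rw [PySem.Dict.get?_insert, if_pos he]⟩
      · exact ⟨v, by rw [PySem.Dict.get?_insert, if_neg he, hv]⟩
    · intro i hi hia
      by_cases he : i = a
      · subst he; exact ⟨_, by rw [PySem.Dict.get?_insert, if_pos rfl]⟩
      · obtain ⟨v, hv⟩ := hdone i hi (by omega)
        by_cases he2 : (i, i + len) = (a, a + len)
        · exact ⟨_, by rw [PySem.Dict.get?_insert, if_pos he2]⟩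
        · exact ⟨v, by rw [PySem.Dict.get?_insert, if_neg he2, hv]⟩

theorem outerLoop_spec (cs : List Char) :
    ∀ (c : Nat) (a : Int) (d : PySem.Dict (Int × Int) Int),
      2 ≤ a →
      (((cs.length : Int) + 1) - a).toNat = c →
      CostSound cs d → CostComplete cs d (a - 1) →
      CostSound cs ((PySem.List.pyRange a ((cs.length : Int) + 1) 1).foldl
          (fun d len =>
            (PySem.List.pyRange 0 ((cs.length : Int) - len + 1) 1).foldl
              (fun d i =>
                let j := i + len
                d.insert (i, j)
                  (d.getD (i + 1, j - 1) 0 +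
                    (if PySem.List.pyGet? cs i ≠ PySem.List.pyGet? cs (j - 1) then 1 else 0)))
              d)
          d) ∧
        CostComplete cs ((PySem.List.pyRange a ((cs.length : Int) + 1) 1).foldl
          (fun d len =>
            (PySem.List.pyRange 0 ((cs.length : Int) - len + 1) 1).foldl
              (fun d i =>
                let j := i + len
                d.insert (i, j)
                  (d.getD (i + 1, j - 1) 0 +
                    (if PySem.List.pyGet? cs i ≠ PySem.List.pyGet? cs (j - 1) then 1 else 0)))
              d)
          d) (cs.length : Int) := by
  intro c
  induction c with
  | zero =>
    intro a d ha hm hs hc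
    rw [PySem.List.pyRange_one_eq_nil (by omega)]
    exact ⟨hs, fun i j hi hj h1 h2 => hc i j hi hj h1 (by omega)⟩
  | succ c ih =>
    intro a d ha hm hs hc
    rw [PySem.List.pyRange_one_cons (by omega), List.foldl_cons]
    obtain ⟨hs1, hc1, hrow⟩ :=
      innerLoop_spec cs a (by omega) (((cs.length : Int) - a + 1) - 0).toNat 0 d
        (by omega) rfl hs hc (fun i hi hia => absurd hia (by omega))
    refine ih (a + 1) _ (by omega) (by omega) hs1 ?_
    intro i j hi hj h1 h2
    by_cases hgap : j - i ≤ a - 1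
    · exact hc1 i j hi hj h1 hgap
    · have hj2 : j = i + a := by omega
      subst hj2
      exact hrow i hi (by omega)

theorem costTab_spec (cs : List Char) :
    CostSound cs (pvCostTab cs) ∧ CostComplete cs (pvCostTab cs) (cs.length : Int) := by
  unfold pvCostTab
  refine outerLoop_spec cs (((cs.length : Int) + 1) - 2).toNat 2 PySem.Dict.empty
    (by omega) rfl ?_ ?_
  · intro i j v h
    simp [PySem.Dict.get?_empty] at h
  · intro i j _ _ h1 h2
    omega

-- a right-commutative fold is insensitive to reversing the list
theorem foldl_last_comm {α β : Type} (f : α → β → α)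
    (hcomm : ∀ a x y, f (f a x) y = f (f a y) x) :
    ∀ (l : List β) (a : α) (x : β), l.foldl f (f a x) = f (l.foldl f a) x := by
  intro l
  induction l with
  | nil => intro a x; rfl
  | cons b t ih =>
    intro a x
    simp only [List.foldl_cons]
    rw [hcomm a x b, ih]

theorem foldl_reverse_comm {α β : Type} (f : α → β → α)
    (hcomm : ∀ a x y, f (f a x) y = f (f a y) x) :
    ∀ (l : List β) (a : α), l.reverse.foldl f a = l.foldl f a := by
  intro l
  induction l with
  | nil => intro a; rfl
  | cons b t ih =>
    intro a
    simp only [List.reverse_cons, List.foldl_append, List.foldl_cons, List.foldl_nil, ih,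
      foldl_last_comm f hcomm]

theorem pyRange_one_shift (a b : Int) :
    PySem.List.pyRange a b 1 = (PySem.List.pyRange (a - 1) (b - 1) 1).map (· + 1) := by
  rw [PySem.List.pyRange_one, PySem.List.pyRange_one, List.map_map]
  have hd : b - 1 - (a - 1) = b - a := by ring
  rw [hd]
  apply List.map_congr_left
  intro k _
  simp only [Function.comp_apply]
  ring

-- the running-min fold with a some-producing step yields some on a nonempty list
theorem foldl_someMin_some (t : Int → Int) :
    ∀ (l : List Int) (r : Int),
      l.foldl (fun acc p =>
        some (match acc with | none => t p | some a => min a (t p))) (some r) =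
      some (l.foldl (fun a p => min a (t p)) r) := by
  intro l
  induction l with
  | nil => intro r; rfl
  | cons b tl ih => intro r; simp only [List.foldl_cons, ih]

theorem helper_eq_dpVal (cs : List Char) (fuel : Nat) (e kk : Int)
    (h1 : 1 ≤ kk) (h2 : kk = 1 ∨ kk ≤ e) (hf : kk.toNat < fuel) :
    pvHelper cs fuel e kk = some (dpVal cs kk e) := by
  induction fuel generalizing e kk with
  | zero => omega
  | succ fuel ih =>
    by_cases hk1 : kk = 1
    · subst hk1
      rw [pvHelper, if_pos (by simp), dpVal, dif_pos (by omega)]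
    · have hke : kk ≤ e := by tauto
      have hk2 : 2 ≤ kk := by omega
      rw [pvHelper, if_neg (by simp [hk1])]
      -- replace the recursive pvHelper call by dpVal via the induction hypothesis
      rw [PySem.List.foldl_congr_mem _ _
        (fun res i =>
          some (match res with
            | none => dpVal cs (kk - 1) (i - 1) + pvMP cs (i - 1) (e - 1)
            | some r => min r (dpVal cs (kk - 1) (i - 1) + pvMP cs (i - 1) (e - 1)))) _
        (by
          intro acc i hmem
          rw [PySem.List.mem_pyRange_neg_one] at hmem
          show (match pvHelper cs fuel (i - 1) (kk - 1) with
            | none => acc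
            | some h =>
              match acc with
              | none => some (pvMP cs (i - 1) (e - 1) + h)
              | some r => some (min r (pvMP cs (i - 1) (e - 1) + h))) = _
          rw [ih (i - 1) (kk - 1) (by omega) (by omega) (by omega)]
          cases acc <;> simp [add_comm])]
      -- turn the countdown range into the reverse of an ascending one, drop the reverse
      rw [PySem.List.pyRange_neg_one_eq_reverse]
      rw [foldl_reverse_comm _ (by
        intro a x y
        cases a <;> simp <;> omega)]
      have hsh : kk - 1 + 1 = kk := by ring
      rw [hsh, pyRange_one_shift kk (e + 1), List.foldl_map]
      have hsh2 : kk - 1 = kk - 1 ∧ e + 1 - 1 = e := ⟨rfl, by ring⟩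
      rw [hsh2.2]
      -- now both sides fold the same step over pyRange (kk-1) e 1
      rw [dpVal, dif_neg (by omega)]
      rw [PySem.List.foldl_congr_mem _ _
        (fun acc p =>
          some (match acc with
            | none => dpVal cs (kk - 1) p + pvMP cs p (e - 1)
            | some a => min a (dpVal cs (kk - 1) p + pvMP cs p (e - 1)))) _
        (by
          intro acc p _
          have hp : p + 1 - 1 = p := by ring
          simp only [hp])]
      -- the range is nonempty, so the fold is a some and getD cancels
      rw [PySem.List.pyRange_one_cons (by omega), List.foldl_cons]
      rw [foldl_someMin_some (fun p => dpVal cs (kk - 1) p + pvMP cs p (e - 1))]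
      rfl

theorem rowLoop_spec (cs : List Char) (k : Int) :
    ∀ (c : Nat) (a : Int) (prev : List Int),
      2 ≤ a →
      ((k + 1) - a).toNat = c →
      prev = (PySem.List.pyRange 0 ((cs.length : Int) + 1) 1).map (fun j => dpVal cs (a - 1) j) →
      (PySem.List.pyRange a (k + 1) 1).foldl
          (fun prev m =>
            (PySem.List.pyRange 0 ((cs.length : Int) + 1) 1).map
              (fun j => pvMinRow (pvCostTab cs) prev m j))
          prev =
        (PySem.List.pyRange 0 ((cs.length : Int) + 1) 1).map
          (fun j => dpVal cs (max k (a - 1)) j) := by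
  intro c
  induction c with
  | zero =>
    intro a prev ha hm hprev
    rw [PySem.List.pyRange_one_eq_nil (a := a) (b := k + 1) (by omega), List.foldl_nil, hprev]
    have : max k (a - 1) = a - 1 := by omega
    rw [this]
  | succ c ih =>
    intro a prev ha hm hprev
    rw [PySem.List.pyRange_one_cons (a := a) (b := k + 1) (by omega), List.foldl_cons]
    have hrow : (PySem.List.pyRange 0 ((cs.length : Int) + 1) 1).map
        (fun j => pvMinRow (pvCostTab cs) prev a j) =
        (PySem.List.pyRange 0 ((cs.length : Int) + 1) 1).map (fun j => dpVal cs (a + 1 - 1) j) := by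
      apply List.map_congr_left
      intro j hj
      rw [PySem.List.mem_pyRange_one] at hj
      have hj1 : j ≤ (cs.length : Int) := by omega
      unfold pvMinRow
      have ha1 : a + 1 - 1 = a := by ring
      rw [ha1]
      conv_rhs => rw [dpVal, dif_neg (by omega)]
      rw [PySem.List.foldl_congr_mem _ _
        (fun acc p =>
          some (match acc with
            | none => dpVal cs (a - 1) p + pvMP cs p (j - 1)
            | some x => min x (dpVal cs (a - 1) p + pvMP cs p (j - 1)))) _
        (by
          intro acc p hp
          rw [PySem.List.mem_pyRange_one] at hp
          rw [hprev, PySem.List.pyGetD_map_pyRange_of_nonneg _ _ _ _ (by omega) (by omega)]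
          rw [costOK cs (pvCostTab cs) (cs.length : Int) (costTab_spec cs).1 (costTab_spec cs).2
            p j (by omega) hj1 (by omega)])]
    rw [hrow]
    have hmax : max k (a + 1 - 1) = max k (a - 1) := by omega
    exact hmax ▸ ih (a + 1) _ (by omega) (by omega) rfl

theorem alt_eq_dpVal (s : String) (k : Int) (hk : 1 ≤ k)
    (hkn : k ≤ (s.toList.length : Int) ∨ k = 1) :
    palindromePartition1_alt s k = dpVal s.toList k (s.toList.length : Int) := by
  unfold palindromePartition1_alt
  rw [if_neg (by omega)]
  show PySem.List.pyGetD
      ((PySem.List.pyRange 2 (k + 1) 1).foldl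
        (fun prev m => (PySem.List.pyRange 0 ((s.toList.length : Int) + 1) 1).map
          (fun j => pvMinRow (pvCostTab s.toList) prev m j))
        ((PySem.List.pyRange 0 ((s.toList.length : Int) + 1) 1).map
          (fun j => (pvCostTab s.toList).getD (0, j) 0)))
      (s.toList.length : Int) 0 = dpVal s.toList k (s.toList.length : Int)
  have hrow1 : (PySem.List.pyRange 0 ((s.toList.length : Int) + 1) 1).map
      (fun j => (pvCostTab s.toList).getD (0, j) 0) =
      (PySem.List.pyRange 0 ((s.toList.length : Int) + 1) 1).map (fun j => dpVal s.toList (2 - 1) j) := by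
    apply List.map_congr_left
    intro j hj
    rw [PySem.List.mem_pyRange_one] at hj
    rw [costOK s.toList (pvCostTab s.toList) (s.toList.length : Int) (costTab_spec s.toList).1
      (costTab_spec s.toList).2 0 j (by omega) (by omega) (by omega)]
    rw [dpVal, dif_pos (by omega)]
  rw [hrow1,
    rowLoop_spec s.toList k ((k + 1) - 2).toNat 2 _ (by omega) rfl rfl,
    PySem.List.pyGetD_map_pyRange_of_nonneg _ _ _ _ (by omega) (by omega)]
  have : max k (2 - 1) = k := by omega
  rw [this]

-- ===== VERDICT (by name: the statement is the Claim_ definition above) =====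
theorem palindromePartition1_spec : Claim_equal_palindromePartition1 := by
  intro s k _ hpre
  obtain ⟨hk, hkn⟩ := hpre
  unfold Spec_palindromePartition1
  rw [alt_eq_dpVal s k hk hkn]
  unfold palindromePartition1
  simp only [PySem.Str.len_eq]
  rw [helper_eq_dpVal s.toList (k.toNat + 1) _ k hk (by omega) (by omega), Option.getD_some]
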